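-- pv_equiv track=rewrite | github.com/wxpn/burpParser | parser.py | _truncate_cookie
-- ===== SOURCE A (Python) =====
-- def _truncate_cookie(http_message: str) -> str:
--     """
--     Truncates only the Cookie header in the HTTP request while preserving all other headers
--     and message content.
--
--     Args:
--         http_message (str): The complete HTTP message
--
--     Returns:
--         str: HTTP message with only Cookie header truncated
--     """
--     if not http_message:
--         return http_message
--
--     # Split the message into lines
--     lines = http_message.split('\n')
--     modified_lines = []
--
--     for line in lines:
--         # Only modify lines that start with 'Cookie:'
--         if line.strip().startswith('Cookie:'):
--             modified_lines.append('Cookie: [snipped]')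
--         else:
--             modified_lines.append(line)
--
--     # Reconstruct the message maintaining original line endings
--     return '\n'.join(modified_lines)
-- ===== SOURCE B (Python) =====
-- import re
--
-- _COOKIE_LINE = re.compile(r'^[ \t\r\x0b\x0c]*Cookie:.*$', re.MULTILINE)
--
--
-- def _truncate_cookie(http_message: str) -> str:
--     """Truncate only Cookie header lines, preserving everything else."""
--     if not http_message:
--         return http_message
--     return _COOKIE_LINE.sub('Cookie: [snipped]', http_message)
-- ===== Notes on version B (the rewrite author's own statement) =====
-- stated objective: idiomatic
-- what changed: Replaces the newline-split / per-line loop / join pipeline with a single precompiled re.sub over the whole message (a MULTILINE-anchored pattern matching each Cookie header line in place).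
import Mathlib
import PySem

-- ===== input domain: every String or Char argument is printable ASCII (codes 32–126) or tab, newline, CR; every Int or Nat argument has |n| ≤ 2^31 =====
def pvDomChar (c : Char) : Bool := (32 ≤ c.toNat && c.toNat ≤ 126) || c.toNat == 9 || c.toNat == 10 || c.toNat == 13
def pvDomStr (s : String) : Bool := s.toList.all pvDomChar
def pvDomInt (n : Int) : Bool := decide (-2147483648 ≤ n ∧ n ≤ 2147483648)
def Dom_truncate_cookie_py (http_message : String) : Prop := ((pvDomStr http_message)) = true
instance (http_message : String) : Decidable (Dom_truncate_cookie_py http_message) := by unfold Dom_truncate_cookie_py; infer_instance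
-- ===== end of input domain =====

-- B replaces A's split('\n') / per-line loop / join pipeline with one MULTILINE regex
-- substitution over the whole message (objective: idiomatic; same cost).

-- ===== PORT A =====
def truncate_cookie_py (http_message : String) : String :=
  if http_message == "" then http_message
  else
    -- lines = http_message.split('\n')  (sep ≠ "", so split? is some)
    let lines := (PySem.Str.split? http_message "\n").getD []
    -- for line in lines: append 'Cookie: [snipped]' or line
    let modified_lines := lines.foldl (fun acc line =>
      if PySem.Str.startswith (PySem.Str.strip line) "Cookie:" then
        acc ++ ["Cookie: [snipped]"]
      else
        acc ++ [line]) []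
    PySem.Str.join "\n" modified_lines

-- ===== PORT B =====
-- the regex character class [ \t\r\x0b\x0c]
def pvWsB (c : Char) : Bool := c == ' ' || c == '\t' || c == '\r' || c.toNat == 11 || c.toNat == 12

-- does the regex ^[ \t\r\x0b\x0c]*Cookie:.*$ match at this position (a line start)?
def pvCookieMatch (cs : List Char) : Bool :=
  "Cookie:".toList.isPrefixOf (cs.dropWhile pvWsB)

-- the regex engine's left-to-right scan: at each line start try the pattern; on a match
-- emit the replacement and skip the matched line (.* stops before '\n'); else copy a char.
def pvScan : Bool → List Char → List Char
  | _, [] => []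
  | atStart, c :: rest =>
    if h : atStart && pvCookieMatch (c :: rest) then
      "Cookie: [snipped]".toList ++ pvScan false ((c :: rest).dropWhile (· ≠ '\n'))
    else
      c :: pvScan (c == '\n') rest
termination_by _ cs => cs.length
decreasing_by
  · simp only [Bool.and_eq_true] at h
    have hc : c ≠ '\n' := by
      intro hc; subst hc
      have hck : "Cookie:".toList = ['C','o','o','k','i','e',':'] := rfl
      simp [pvCookieMatch, pvWsB, List.dropWhile, hck, List.isPrefixOf] at h
    have h1 : (c :: rest).dropWhile (· ≠ '\n') = rest.dropWhile (· ≠ '\n') := by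
      simp [List.dropWhile_cons, hc]
    have h2 := List.length_dropWhile_le (fun x => decide (x ≠ '\n')) rest
    simp only [h1]
    simp only [List.length_cons]
    omega
  · simp

def truncate_cookie_py_alt (http_message : String) : String :=
  if http_message == "" then http_message
  else String.ofList (pvScan true http_message.toList)

-- ===== PRECONDITION & SPEC =====
def Spec_truncate_cookie_py (http_message : String) (out : String) : Prop := out = truncate_cookie_py_alt http_message
instance (http_message : String) (out : String) : Decidable (Spec_truncate_cookie_py http_message out) := by unfold Spec_truncate_cookie_py; infer_instance

-- ===== CLAIM (what is proved, stated in full; the proofs are below) =====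
def Claim_equal_truncate_cookie_py : Prop := ∀ (http_message : String), Dom_truncate_cookie_py http_message → Spec_truncate_cookie_py http_message (truncate_cookie_py http_message)

-- ===== LEMMAS AND PROOFS =====

-- simple recursive characterisation of split on '\n'
def splitNl : List Char → List (List Char)
  | [] => [[]]
  | c :: rest => if c = '\n' then [] :: splitNl rest else (splitNl rest).modifyHead (c :: ·)

-- A's per-line transformation
def pvFA (line : List Char) : List Char :=
  if PySem.Chars.startswith (PySem.Chars.strip line) "Cookie:".toList then
    "Cookie: [snipped]".toList
  else line

theorem splitNl_ne_nil (l : List Char) : splitNl l ≠ [] := by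
  induction l with
  | nil => simp [splitNl]
  | cons c rest ih =>
    simp only [splitNl]
    split
    · simp
    · cases h : splitNl rest with
      | nil => exact absurd h ih
      | cons a t => simp [h]

theorem pvScan_false_cons (c : Char) (rest : List Char) :
    pvScan false (c :: rest) = c :: pvScan (c == '\n') rest := by
  rw [pvScan]; simp

theorem pvScan_true_cons_pos (c : Char) (rest : List Char) (h : pvCookieMatch (c :: rest) = true) :
    pvScan true (c :: rest)
      = "Cookie: [snipped]".toList ++ pvScan false ((c :: rest).dropWhile (· ≠ '\n')) := by
  rw [pvScan]; simp [h]

theorem pvScan_true_cons_neg (c : Char) (rest : List Char) (h : pvCookieMatch (c :: rest) = false) :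
    pvScan true (c :: rest) = c :: pvScan (c == '\n') rest := by
  rw [pvScan]; simp [h]

theorem go_spec (fuel : Nat) (l cur : List Char) (acc : List (List Char))
    (h : l.length ≤ fuel) :
    PySem.Chars.splitOn.go ['\n'] fuel l cur acc
      = acc.reverse ++ (splitNl l).modifyHead (cur.reverse ++ ·) := by
  induction fuel generalizing l cur acc with
  | zero =>
    have hl : l = [] := by
      cases l with
      | nil => rfl
      | cons a t => simp at h
    subst hl
    simp [PySem.Chars.splitOn.go, splitNl]
  | succ fuel ih =>
    cases l with
    | nil => simp [PySem.Chars.splitOn.go, splitNl]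
    | cons c r =>
      by_cases hc : c = '\n'
      · subst hc
        have hpre : ['\n'].isPrefixOf ('\n' :: r) = true := by simp [List.isPrefixOf]
        rw [PySem.Chars.splitOn.go]
        simp only [hpre, if_true, List.length_cons, List.length_nil, List.drop_succ_cons,
          List.drop_zero]
        rw [ih r [] (cur.reverse :: acc) (by simp at h ⊢; omega)]
        simp [splitNl, List.modifyHead]
        cases hs : splitNl r with
        | nil => exact absurd hs (splitNl_ne_nil r)
        | cons a t => simp
      · have hpre : ['\n'].isPrefixOf (c :: r) = false := by
          simp [List.isPrefixOf]
          exact fun hh => absurd hh.symm hc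
        rw [PySem.Chars.splitOn.go]
        simp only [hpre, Bool.false_eq_true, if_false]
        rw [ih r (c :: cur) acc (by simp at h ⊢; omega)]
        simp only [splitNl, hc, if_false]
        cases hs : splitNl r with
        | nil => exact absurd hs (splitNl_ne_nil r)
        | cons a t => simp [List.modifyHead]

theorem splitOn_nl (l : List Char) : PySem.Chars.splitOn l ['\n'] = splitNl l := by
  unfold PySem.Chars.splitOn
  rw [go_spec (l.length + 1) l [] [] (by omega)]
  simp only [List.reverse_nil, List.nil_append]
  cases splitNl l with
  | nil => rfl
  | cons a t => rfl

theorem foldl_if_append (p : String → Bool) (u : String) (xs : List String) (acc : List String) :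
    xs.foldl (fun a x => if p x then a ++ [u] else a ++ [x]) acc
      = acc ++ xs.map (fun x => if p x then u else x) := by
  induction xs generalizing acc with
  | nil => simp
  | cons x t ih => by_cases h : p x <;> simp [h, ih]

-- A reduced to char level
theorem A_eq (s : String) (hne : s ≠ "") :
    truncate_cookie_py s
      = String.ofList (PySem.Chars.join ['\n'] ((splitNl s.toList).map pvFA)) := by
  have hb : (s == "") = false := beq_eq_false_iff_ne.mpr hne
  unfold truncate_cookie_py
  simp only [hb, Bool.false_eq_true, if_false]
  rw [foldl_if_append]
  simp only [List.nil_append]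
  unfold PySem.Str.split? PySem.Chars.split? PySem.Str.join
  simp only [List.isEmpty_iff]
  rw [if_neg (by simp : ("\n".toList : List Char) ≠ [])]
  simp only [Option.map_some, Option.getD_some]
  congr 1
  congr 1
  rw [show ("\n".toList : List Char) = ['\n'] from rfl, splitOn_nl]
  rw [List.map_map, List.map_map]
  apply List.map_congr_left
  intro line _
  simp only [Function.comp]
  unfold pvFA PySem.Str.startswith PySem.Str.strip
  simp only [String.toList_ofList]
  split <;> simp

-- B's scan away from a line start copies up to the next '\n'
def pvRest (cs : List Char) : List Char :=
  match cs with
  | [] => []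
  | _ :: r => '\n' :: pvScan true r

theorem scan_false (cs : List Char) :
    pvScan false cs = cs.takeWhile (· ≠ '\n') ++ pvRest (cs.dropWhile (· ≠ '\n')) := by
  induction cs with
  | nil => simp [pvScan, pvRest]
  | cons c rest ih =>
    by_cases hc : c = '\n'
    · subst hc
      simp [pvScan, pvRest, List.takeWhile, List.dropWhile]
    · have hb : (c == '\n') = false := beq_eq_false_iff_ne.mpr hc
      rw [pvScan_false_cons, hb, ih]
      simp [List.takeWhile_cons, List.dropWhile_cons, hc]

-- splitNl's head/tail view
theorem splitNl_view (cs : List Char) :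
    splitNl cs = cs.takeWhile (· ≠ '\n')
      :: (match cs.dropWhile (· ≠ '\n') with | [] => [] | _ :: r => splitNl r) := by
  induction cs with
  | nil => simp [splitNl]
  | cons c rest ih =>
    by_cases hc : c = '\n'
    · subst hc; simp [splitNl, List.takeWhile, List.dropWhile]
    · simp only [splitNl, hc, if_false, List.takeWhile_cons, List.dropWhile_cons]
      rw [ih]
      simp [hc]

-- the join of the mapped split, one line at a time
theorem join_view (cs : List Char) :
    PySem.Chars.join ['\n'] ((splitNl cs).map pvFA)
      = pvFA (cs.takeWhile (· ≠ '\n'))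
        ++ (match cs.dropWhile (· ≠ '\n') with
            | [] => []
            | _ :: r => '\n' :: PySem.Chars.join ['\n'] ((splitNl r).map pvFA)) := by
  rw [splitNl_view]
  cases hd : cs.dropWhile (· ≠ '\n') with
  | nil => simp [PySem.Chars.join_singleton]
  | cons x r =>
    cases hs : (splitNl r).map pvFA with
    | nil => exact absurd (by simpa using hs) (splitNl_ne_nil r)
    | cons a t =>
      simp only [List.map_cons, hs, PySem.Chars.join_cons_cons]
      simp

-- head of the dropWhile is the separator
theorem dropNl_head (l : List Char) (x : Char) (r : List Char)
    (h : l.dropWhile (· ≠ '\n') = x :: r) : x = '\n' := by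
  induction l with
  | nil => simp at h
  | cons c rest ih =>
    by_cases hc : c = '\n'
    · subst hc; simp [List.dropWhile_cons] at h; exact h.1.symm
    · rw [List.dropWhile_cons, if_pos (by simpa using hc)] at h
      exact ih h

theorem pv_char_toNat_inj (c d : Char) (h : c.toNat = d.toNat) : c = d :=
  Char.ext (UInt32.toNat_inj.mp h)

-- the regex whitespace class agrees with Python's isspace on Dom characters other than '\n'
theorem ws_eq (c : Char) (h1 : pvDomChar c = true) (h2 : c ≠ '\n') :
    pvWsB c = PySem.Chars.isspace c := by
  have h2' : c.toNat ≠ 10 := by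
    intro hn
    exact h2 (pv_char_toNat_inj c '\n' (by rw [hn]; rfl))
  simp only [pvDomChar, Bool.or_eq_true, Bool.and_eq_true, decide_eq_true_eq, beq_iff_eq] at h1
  have hsp : (c = ' ') ↔ c.toNat = 32 := ⟨fun h => by subst h; rfl, fun h => pv_char_toNat_inj _ _ (by rw [h]; rfl)⟩
  have htb : (c = '\t') ↔ c.toNat = 9 := ⟨fun h => by subst h; rfl, fun h => pv_char_toNat_inj _ _ (by rw [h]; rfl)⟩
  have hcr : (c = '\r') ↔ c.toNat = 13 := ⟨fun h => by subst h; rfl, fun h => pv_char_toNat_inj _ _ (by rw [h]; rfl)⟩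
  simp only [pvWsB, PySem.Chars.isspace, Bool.or_eq_true, Bool.and_eq_true]
  rw [Bool.eq_iff_iff]
  simp only [Bool.or_eq_true, Bool.and_eq_true, decide_eq_true_eq, beq_iff_eq, hsp, htb, hcr]
  omega

-- every element of lstrip's result region: dropWhile congruence
theorem dropWhile_congr_mem {α : Type} (p q : α → Bool) (l : List α)
    (h : ∀ a ∈ l, p a = q a) : l.dropWhile p = l.dropWhile q := by
  induction l with
  | nil => rfl
  | cons a t ih =>
    have ha := h a (by simp)
    rw [List.dropWhile_cons, List.dropWhile_cons, ha]
    split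
    · exact ih (fun b hb => h b (by simp [hb]))
    · rfl

-- rstrip does not change whether "Cookie:" is a prefix (its last char is not whitespace)
theorem rstrip_startswith (y : List Char) :
    "Cookie:".toList.isPrefixOf (PySem.Chars.rstrip y) = "Cookie:".toList.isPrefixOf y := by
  rw [Bool.eq_iff_iff, List.isPrefixOf_iff_prefix, List.isPrefixOf_iff_prefix]
  constructor
  · intro h
    refine h.trans ?_
    unfold PySem.Chars.rstrip
    have := List.dropWhile_suffix (l := y.reverse) PySem.Chars.isspace
    have h2 : (y.reverse.dropWhile PySem.Chars.isspace).reverse <+: y.reverse.reverse :=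
      List.reverse_prefix.mpr this
    simpa using h2
  · rintro ⟨t, rfl⟩
    unfold PySem.Chars.rstrip
    rw [List.reverse_append, List.dropWhile_append]
    split
    · rw [show ("Cookie:".toList : List Char).reverse.dropWhile PySem.Chars.isspace
          = ("Cookie:".toList : List Char).reverse from rfl]
      simp
    · rw [List.reverse_append, List.reverse_reverse]
      exact List.prefix_append _ _

-- prefix test unaffected by what follows the line ('\n' does not occur in "Cookie:")
theorem prefix_stop_at_nl (x : List Char) (r : List Char) :
    "Cookie:".toList.isPrefixOf (x ++ '\n' :: r) = "Cookie:".toList.isPrefixOf x := by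
  rw [Bool.eq_iff_iff, List.isPrefixOf_iff_prefix, List.isPrefixOf_iff_prefix]
  constructor
  · intro h
    rcases List.prefix_or_prefix_of_prefix h (List.prefix_append x ('\n' :: r)) with h1 | h1
    · exact h1
    · obtain ⟨t, ht⟩ := h1
      rcases h with ⟨u, hu⟩
      rw [← ht, List.append_assoc] at hu
      have ht2 : t ++ u = '\n' :: r := List.append_cancel_left hu
      cases t with
      | nil => rw [← ht]; simp
      | cons a t' =>
        have ha : a = '\n' := by
          have := congrArg (List.head? ·) ht2
          simpa using this
        subst ha
        have hmem : '\n' ∈ ("Cookie:".toList : List Char) := by rw [← ht]; simp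
        exact absurd hmem (by decide)
  · intro h
    exact h.trans (List.prefix_append x _)

-- the regex match condition equals A's strip().startswith test, on Dom characters
theorem match_eq_cond (cs : List Char) (hdom : ∀ c ∈ cs, pvDomChar c = true) :
    pvCookieMatch cs
      = PySem.Chars.startswith (PySem.Chars.strip (cs.takeWhile (· ≠ '\n'))) "Cookie:".toList := by
  unfold pvCookieMatch PySem.Chars.startswith PySem.Chars.strip PySem.Chars.lstrip
  set line := cs.takeWhile (· ≠ '\n') with hline
  have hsplit : cs = line ++ cs.dropWhile (· ≠ '\n') := (List.takeWhile_append_dropWhile).symm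
  have hstep3 : line.dropWhile pvWsB = line.dropWhile PySem.Chars.isspace := by
    apply dropWhile_congr_mem
    intro a ha
    have hmem : a ∈ cs := (List.takeWhile_sublist _).mem ha
    have hne : a ≠ '\n' := by
      have := List.mem_takeWhile_imp ha
      simpa using this
    exact ws_eq a (hdom a hmem) hne
  have hstep1 : cs.dropWhile pvWsB = line.dropWhile pvWsB ++ cs.dropWhile (· ≠ '\n') := by
    conv_lhs => rw [hsplit]
    rw [List.dropWhile_append]
    split
    · rename_i hemp
      rw [List.isEmpty_iff] at hemp
      rw [hemp, List.nil_append]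
      cases hd : cs.dropWhile (· ≠ '\n') with
      | nil => rfl
      | cons x r =>
        have hx := dropNl_head cs x r hd
        subst hx
        rw [List.dropWhile_cons, if_neg (by simp [pvWsB])]
    · rfl
  rw [hstep1, rstrip_startswith, ← hstep3]
  cases hd : cs.dropWhile (· ≠ '\n') with
  | nil => simp
  | cons x r =>
    have hx := dropNl_head cs x r hd
    subst hx
    exact prefix_stop_at_nl _ r

-- main induction: the regex scan equals the join of the per-line map
theorem scan_eq_join_aux (n : Nat) (cs : List Char) (hn : cs.length ≤ n)
    (hdom : ∀ c ∈ cs, pvDomChar c = true) :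
    pvScan true cs = PySem.Chars.join ['\n'] ((splitNl cs).map pvFA) := by
  induction n generalizing cs with
  | zero =>
    have : cs = [] := by cases cs with | nil => rfl | cons a t => simp at hn
    subst this
    simp [pvScan, splitNl, PySem.Chars.join_singleton, pvFA,
      PySem.Chars.startswith, PySem.Chars.strip, PySem.Chars.lstrip, PySem.Chars.rstrip]
  | succ n ih =>
    cases cs with
    | nil =>
      simp [pvScan, splitNl, PySem.Chars.join_singleton, pvFA,
        PySem.Chars.startswith, PySem.Chars.strip, PySem.Chars.lstrip, PySem.Chars.rstrip]
    | cons c rest =>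
      have hmc := match_eq_cond (c :: rest) hdom
      rw [join_view]
      have hdomdrop : ∀ a ∈ (c :: rest).dropWhile (· ≠ '\n'), pvDomChar a = true :=
        fun a ha => hdom a ((List.dropWhile_sublist _).mem ha)
      have hlendrop := List.length_dropWhile_le (fun x => decide (x ≠ '\n')) (c :: rest)
      by_cases hm : pvCookieMatch (c :: rest) = true
      · rw [pvScan_true_cons_pos c rest hm]
        have hfa : pvFA ((c :: rest).takeWhile (· ≠ '\n')) = "Cookie: [snipped]".toList := by
          unfold pvFA
          rw [if_pos (by rw [← hmc]; exact hm)]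
        rw [hfa]
        cases hd : (c :: rest).dropWhile (· ≠ '\n') with
        | nil => simp [pvScan]
        | cons x r =>
          have hx := dropNl_head _ x r hd
          subst hx
          rw [pvScan_false_cons]
          have hbt : ('\n' == '\n') = true := by decide
          rw [hbt]
          congr 2
          apply ih r
          · rw [hd] at hlendrop; simp at hlendrop hn ⊢; omega
          · intro a ha; exact hdomdrop a (by rw [hd]; simp [ha])
      · have hfa : pvFA ((c :: rest).takeWhile (· ≠ '\n')) = (c :: rest).takeWhile (· ≠ '\n') := by
          unfold pvFA
          rw [if_neg (by rw [← hmc]; simpa using hm)]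
        have hm' : pvCookieMatch (c :: rest) = false := by simpa using hm
        rw [hfa, pvScan_true_cons_neg c rest hm']
        by_cases hc : c = '\n'
        · subst hc
          have hbt : ('\n' == '\n') = true := by decide
          rw [hbt]
          rw [List.takeWhile_cons, List.dropWhile_cons]
          simp only [ne_eq, not_true_eq_false, decide_false, Bool.false_eq_true, if_false]
          simp only [List.nil_append]
          congr 1
          apply ih rest (by simp at hn ⊢; omega)
          intro a ha; exact hdom a (by simp [ha])
        · have hb : (c == '\n') = false := beq_eq_false_iff_ne.mpr hc
          rw [hb, scan_false]
          rw [List.takeWhile_cons, List.dropWhile_cons]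
          simp only [ne_eq, hc, not_false_eq_true, decide_true, if_true, List.cons_append]
          congr 1
          congr 1
          cases hd : rest.dropWhile (· ≠ '\n') with
          | nil => rfl
          | cons x r =>
            show '\n' :: pvScan true r = '\n' :: PySem.Chars.join ['\n'] ((splitNl r).map pvFA)
            congr 1
            apply ih r
            · have := List.length_dropWhile_le (fun x => decide (x ≠ '\n')) rest
              rw [hd] at this; simp at this hn ⊢; omega
            · intro a ha
              have : a ∈ rest.dropWhile (· ≠ '\n') := by rw [hd]; simp [ha]
              exact hdom a (by simp [(List.dropWhile_sublist _).mem this])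

-- ===== VERDICT (by name: the statement is the Claim_ definition above) =====
theorem truncate_cookie_py_spec : Claim_equal_truncate_cookie_py := by
  intro s hdom
  unfold Spec_truncate_cookie_py truncate_cookie_py_alt
  by_cases hne : s = ""
  · simp [truncate_cookie_py, hne]
  · have hd : ∀ c ∈ s.toList, pvDomChar c = true := by
      intro c hc
      have h := hdom
      unfold Dom_truncate_cookie_py pvDomStr at h
      exact List.all_eq_true.mp h c hc
    have hb : (s == "") = false := beq_eq_false_iff_ne.mpr hne
    simp only [hb, Bool.false_eq_true, if_false]
    rw [A_eq s hne, scan_eq_join_aux s.toList.length s.toList (le_refl _) hd]
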